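-- pv_equiv track=rewrite | github.com/AubakirovArman/workspace2 | testinference/test_dual_ffmpeg_encode.py | _partition_frames
-- ===== SOURCE A (Python) =====
-- from typing import List, Optional, Tuple
--
-- def _partition_frames(total: int, parts: int) -> List[Tuple[int, int]]:
--     if parts <= 0:
--         raise ValueError("segments must be positive")
--     base = total // parts
--     remainder = total % parts
--     ranges: List[Tuple[int, int]] = []
--     start = 0
--     for idx in range(parts):
--         extra = 1 if idx < remainder else 0
--         end = start + base + extra
--         ranges.append((start, end))
--         start = end
--     return ranges
-- ===== SOURCE B (Python) =====
-- def _partition_frames(total: int, parts: int):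
--     if parts <= 0:
--         raise ValueError("segments must be positive")
--     base, remainder = divmod(total, parts)
--     return [(idx * base + min(idx, remainder),
--              (idx + 1) * base + min(idx + 1, remainder))
--             for idx in range(parts)]
-- ===== Notes on version B (the rewrite author's own statement) =====
-- stated objective: alternative
-- what changed: Replaces the loop carrying a running start accumulator with a stateless comprehension computing each range as a closed form of its index (idx*base + min(idx, remainder)).
import Mathlib
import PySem

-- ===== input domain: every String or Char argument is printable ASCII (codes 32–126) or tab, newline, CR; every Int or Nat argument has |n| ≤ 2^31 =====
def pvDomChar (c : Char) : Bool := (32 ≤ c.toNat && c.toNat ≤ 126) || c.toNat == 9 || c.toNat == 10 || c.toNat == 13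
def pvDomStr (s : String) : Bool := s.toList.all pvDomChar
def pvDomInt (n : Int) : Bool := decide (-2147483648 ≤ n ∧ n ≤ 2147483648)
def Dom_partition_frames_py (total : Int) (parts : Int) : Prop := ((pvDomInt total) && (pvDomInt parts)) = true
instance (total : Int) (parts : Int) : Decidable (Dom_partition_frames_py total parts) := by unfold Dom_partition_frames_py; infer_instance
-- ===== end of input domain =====

-- B replaces A's running-start accumulator loop by a stateless closed form per index; same cost (objective: alternative).

-- ===== PORT A =====
def partition_frames_py (total : Int) (parts : Int) : List (Int × Int) :=
  let base := PySem.Int.floordiv total parts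
  let remainder := PySem.Int.mod total parts
  let res := (PySem.List.pyRange 0 parts 1).foldl
    (fun (st : List (Int × Int) × Int) idx =>
      let extra : Int := if idx < remainder then 1 else 0
      let e := st.2 + base + extra
      (st.1 ++ [(st.2, e)], e)) ([], 0)
  res.1

-- ===== PORT B =====
def partition_frames_py_alt (total : Int) (parts : Int) : List (Int × Int) :=
  let base := PySem.Int.floordiv total parts
  let remainder := PySem.Int.mod total parts
  (PySem.List.pyRange 0 parts 1).map (fun idx =>
    (idx * base + min idx remainder, (idx + 1) * base + min (idx + 1) remainder))

-- ===== PRECONDITION & SPEC =====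
-- A raises ValueError when parts <= 0; exactly those inputs are excluded.
def Pre_partition_frames_py (total : Int) (parts : Int) : Prop := 0 < parts
instance (total : Int) (parts : Int) : Decidable (Pre_partition_frames_py total parts) := by unfold Pre_partition_frames_py; infer_instance
def pvWitness_partition_frames_py : Int × Int := (10, 3)

def Spec_partition_frames_py (total : Int) (parts : Int) (out : List (Int × Int)) : Prop := out = partition_frames_py_alt total parts
instance (total : Int) (parts : Int) (out : List (Int × Int)) : Decidable (Spec_partition_frames_py total parts out) := by unfold Spec_partition_frames_py; infer_instance

-- ===== CLAIM (what is proved, stated in full; the proofs are below) =====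
def Claim_equal_partition_frames_py : Prop := ∀ (total : Int) (parts : Int), Dom_partition_frames_py total parts → Pre_partition_frames_py total parts → Spec_partition_frames_py total parts (partition_frames_py total parts)

-- ===== LEMMAS AND PROOFS =====

-- the state invariant: A's running `start` before processing index a equals B's closed form a*base + min a r
theorem partition_frames_aux (base r : Int) : ∀ (n : Nat) (a : Int) (acc : List (Int × Int)),
    ((PySem.List.pyRange a (a + n) 1).foldl
      (fun (st : List (Int × Int) × Int) idx =>
        let extra : Int := if idx < r then 1 else 0
        let e := st.2 + base + extra
        (st.1 ++ [(st.2, e)], e)) (acc, a * base + min a r)).1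
    = acc ++ (PySem.List.pyRange a (a + n) 1).map (fun idx =>
        (idx * base + min idx r, (idx + 1) * base + min (idx + 1) r)) := by
  intro n
  induction n with
  | zero => intro a acc; simp [PySem.List.pyRange_one_eq_nil (by omega : (a : Int) ≤ a)]
  | succ m ih =>
    intro a acc
    rw [PySem.List.pyRange_one_cons (by omega : a < a + (m + 1 : Nat))]
    simp only [List.foldl_cons, List.map_cons]
    have hstep : a * base + min a r + base + (if a < r then (1 : Int) else 0)
        = (a + 1) * base + min (a + 1) r := by
      by_cases h : a < r
      · rw [min_eq_left (by omega : a ≤ r), min_eq_left (by omega : a + 1 ≤ r)]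
        simp only [if_pos h]; ring
      · rw [min_eq_right (by omega : r ≤ a), min_eq_right (by omega : r ≤ a + 1)]
        simp only [if_neg h]; ring
    have hrange : a + 1 + (m : Int) = a + (m + 1 : Nat) := by push_cast; ring
    have := ih (a + 1) (acc ++ [(a * base + min a r, (a + 1) * base + min (a + 1) r)])
    rw [hrange] at this
    simp only [hstep]
    rw [this, List.append_assoc]
    simp

-- ===== VERDICT (by name: the statement is the Claim_ definition above) =====
theorem partition_frames_py_spec : Claim_equal_partition_frames_py := by
  intro total parts _ hpre
  unfold Spec_partition_frames_py partition_frames_py partition_frames_py_alt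
  have hp : (0 : Int) < parts := hpre
  have hr : 0 ≤ PySem.Int.mod total parts := by
    rw [PySem.Int.mod_eq_emod_of_pos hp]
    exact Int.emod_nonneg total (by omega)
  have h := partition_frames_aux (PySem.Int.floordiv total parts) (PySem.Int.mod total parts)
    parts.toNat 0 []
  rw [show (0 : Int) + ((parts.toNat : Nat) : Int) = parts from by omega,
      show (0 : Int) * PySem.Int.floordiv total parts + min 0 (PySem.Int.mod total parts) = 0 from by
        rw [min_eq_left hr]; ring] at h
  simpa using h
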